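-- pv_equiv track=rewrite | github.com/praveen8ae/Algorithms | Combinatorial algorithms/General combinatorial algorithms/Pseudorandom number generators/Blum Blum Shub/blumblumshub.py | blum_blum_shub
-- ===== SOURCE A (Python) =====
-- def blum_blum_shub(seed, n):
--     p = 1009  # A large prime number
--     q = 3643  # Another large prime number
--     m = p * q  # Modulus for generating random bits
--     x = seed  # Initial seed value
--     result = []
--
--     for _ in range(n):
--         x = (x * x) % m  # Calculate next value using the formula
--
--         # Extract the least significant bit as a random bit
--         bit = x % 2
--         result.append(bit)
--
--     return result
-- ===== SOURCE B (Python) =====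
-- def blum_blum_shub(seed, n):
--     # The squaring map is deterministic on Z_m, so the state sequence is
--     # eventually periodic: record states until the first repeat (or until n
--     # states exist), then tile the cyclic part of the bit sequence.
--     m = 1009 * 3643
--     seen = {}
--     states = []
--     x = (seed * seed) % m
--     while x not in seen and len(states) < n:
--         seen[x] = len(states)
--         states.append(x)
--         x = (x * x) % m
--     if len(states) >= n:
--         return [s % 2 for s in states]
--     mu = seen[x]
--     lam = len(states) - mu
--     head = [s % 2 for s in states]
--     cycle = [s % 2 for s in states[mu:]]
--     q, r = divmod(n - len(states), lam)
--     return head + cycle * q + cycle[:r]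
-- ===== Notes on version B (the rewrite author's own statement) =====
-- stated objective: faster
-- what changed: Instead of iterating the squaring recurrence n times, B records states until the first repeated state (the map is deterministic, so the sequence is then periodic) and tiles the cyclic part of the bit pattern to length n.
import Mathlib
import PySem

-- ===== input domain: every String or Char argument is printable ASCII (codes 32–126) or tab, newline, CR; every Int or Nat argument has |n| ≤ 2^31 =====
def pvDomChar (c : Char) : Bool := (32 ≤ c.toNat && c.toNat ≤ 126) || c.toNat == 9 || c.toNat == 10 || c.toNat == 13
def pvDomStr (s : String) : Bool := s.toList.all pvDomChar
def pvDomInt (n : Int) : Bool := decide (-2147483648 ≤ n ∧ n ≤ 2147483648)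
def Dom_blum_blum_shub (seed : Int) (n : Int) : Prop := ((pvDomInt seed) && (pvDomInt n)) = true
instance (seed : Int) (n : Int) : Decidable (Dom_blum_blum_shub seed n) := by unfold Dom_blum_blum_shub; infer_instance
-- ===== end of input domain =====

-- B replaces the sequential O(n) squaring loop by cycle detection on the state
-- sequence followed by tiling of the periodic bit pattern (faster once n exceeds
-- the cycle length).


-- ===== PORT A =====
def blum_blum_shub (seed : Int) (n : Int) : List Int :=
  let p : Int := 1009
  let q : Int := 3643
  let m : Int := p * q
  let st :=
    (PySem.List.pyRange 0 n 1).foldl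
      (fun (st : Int × List Int) _ =>
        let x := PySem.Int.mod (st.1 * st.1) m
        let bit := PySem.Int.mod x 2
        (x, st.2 ++ [bit]))
      (seed, [])
  st.2

-- ===== PORT B =====
-- the while loop 'while x not in seen and len(states) < n'; each pass appends one
-- state, so fuel n.toNat is exactly enough (fuel 0 coincides with the guard failing)
def bbsAltLoop (m n : Int) (fuel : Nat) (x : Int) (seen : PySem.Dict Int Int)
    (states : List Int) : PySem.Dict Int Int × List Int × Int :=
  match fuel with
  | 0 => (seen, states, x)
  | Nat.succ fuel' =>
    if seen.get? x = none ∧ (states.length : Int) < n then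
      bbsAltLoop m n fuel' (PySem.Int.mod (x * x) m)
        (seen.insert x (states.length : Int)) (states ++ [x])
    else (seen, states, x)

def blum_blum_shub_alt (seed : Int) (n : Int) : List Int :=
  let m : Int := 1009 * 3643
  let x0 := PySem.Int.mod (seed * seed) m
  let res := bbsAltLoop m n n.toNat x0 PySem.Dict.empty []
  let seen := res.1
  let states := res.2.1
  let x := res.2.2
  if n ≤ (states.length : Int) then
    states.map (fun s => PySem.Int.mod s 2)
  else
    let mu := (seen.get? x).getD 0          -- x ∈ seen on this branch; default unreachable
    let lam := (states.length : Int) - mu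
    let head := states.map (fun s => PySem.Int.mod s 2)
    let cycle := (PySem.List.slice states (some mu) none).map (fun s => PySem.Int.mod s 2)
    let q := PySem.Int.floordiv (n - (states.length : Int)) lam
    let r := PySem.Int.mod (n - (states.length : Int)) lam
    head ++ (List.replicate q.toNat cycle).flatten ++ PySem.List.slice cycle none (some r)

-- ===== PRECONDITION & SPEC =====
def Spec_blum_blum_shub (seed : Int) (n : Int) (out : List Int) : Prop := out = blum_blum_shub_alt seed n
instance (seed : Int) (n : Int) (out : List Int) : Decidable (Spec_blum_blum_shub seed n out) := by unfold Spec_blum_blum_shub; infer_instance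

-- ===== CLAIM (what is proved, stated in full; the proofs are below) =====
def Claim_equal_blum_blum_shub : Prop := ∀ (seed : Int) (n : Int), Dom_blum_blum_shub seed n → Spec_blum_blum_shub seed n (blum_blum_shub seed n)

-- ===== LEMMAS AND PROOFS =====

-- the squaring map, and the k-th state of the BBS sequence (st 0 is the first squaring)
def bbsG (x : Int) : Int := PySem.Int.mod (x * x) 3675787
def bbsSt (s : Int) (k : Nat) : Int := bbsG^[k + 1] s

-- A's loop: the running x is the iterate of bbsG, and the bits are its parities.
theorem bbs_a_inv (seed : Int) (acc : List Int) (N : Nat) :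
    ((List.range N).foldl
        (fun (st : Int × List Int) _ =>
          (PySem.Int.mod (st.1 * st.1) 3675787,
            st.2 ++ [PySem.Int.mod (PySem.Int.mod (st.1 * st.1) 3675787) 2]))
        (seed, acc))
      = (bbsG^[N] seed,
          acc ++ (List.range N).map (fun j => PySem.Int.mod (bbsSt seed j) 2)) := by
  induction N with
  | zero => simp
  | succ N ih =>
    simp only [List.range_succ, List.foldl_append, List.foldl_cons, List.foldl_nil, ih,
      List.map_append, List.map_cons, List.map_nil, List.append_assoc]
    have hx : PySem.Int.mod (bbsG^[N] seed * bbsG^[N] seed) 3675787 = bbsG^[N + 1] seed := by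
      rw [Function.iterate_succ_apply']; rfl
    have hb : bbsG^[N + 1] seed = bbsSt seed N := rfl
    rw [hx, hb]

-- invariant of B's while loop after k appended states
def bbsInv (seed : Int) (k : Nat) (seen : PySem.Dict Int Int) (states : List Int)
    (x : Int) : Prop :=
  states = (List.range k).map (bbsSt seed)
  ∧ x = bbsSt seed k
  ∧ (∀ j : Nat, j < k → seen.get? (bbsSt seed j) = some (j : Int))
  ∧ (∀ v : Int, (seen.get? v).isSome → ∃ j : Nat, j < k ∧ bbsSt seed j = v)

theorem bbs_loop_spec (seed n : Int) (fuel : Nat) : ∀ (k : Nat) (seen : PySem.Dict Int Int)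
    (states : List Int) (x : Int), bbsInv seed k seen states x →
    k + fuel = n.toNat →
    ∃ L : Nat, k ≤ L ∧ L ≤ n.toNat ∧
      bbsInv seed L (bbsAltLoop 3675787 n fuel x seen states).1
        (bbsAltLoop 3675787 n fuel x seen states).2.1
        (bbsAltLoop 3675787 n fuel x seen states).2.2
      ∧ (L < n.toNat →
          ((bbsAltLoop 3675787 n fuel x seen states).1.get?
            (bbsAltLoop 3675787 n fuel x seen states).2.2).isSome) := by
  induction fuel with
  | zero =>
    intro k seen states x hInv hfuel
    exact ⟨k, le_refl k, by omega, hInv, by omega⟩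
  | succ fuel ih =>
    intro k seen states x hInv hfuel
    obtain ⟨hstates, hx, hseen1, hseen2⟩ := hInv
    rw [bbsAltLoop]
    by_cases hg : seen.get? x = none ∧ (states.length : Int) < n
    · rw [if_pos hg]
      have hlen : states.length = k := by rw [hstates]; simp
      have hnotin : ∀ j : Nat, j < k → bbsSt seed j ≠ x := by
        intro j hj heq
        have := hseen1 j hj
        rw [heq, hg.1] at this
        simp at this
      have hInv' : bbsInv seed (k + 1) (seen.insert x (states.length : Int))
          (states ++ [x]) (PySem.Int.mod (x * x) 3675787) := by
        refine ⟨?_, ?_, ?_, ?_⟩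
        · rw [hstates, List.range_succ, List.map_append, List.map_cons, List.map_nil, hx]
        · rw [hx]
          show bbsG (bbsSt seed k) = bbsSt seed (k + 1)
          simp [bbsSt, Function.iterate_succ_apply']
        · intro j hj
          by_cases hjk : j < k
          · rw [PySem.Dict.get?_insert_of_ne _ _ (hnotin j hjk), hseen1 j hjk]
          · have hj' : j = k := by omega
            subst hj'
            rw [← hx, PySem.Dict.get?_insert_self, hlen]
        · intro v hv
          by_cases hvx : v = x
          · exact ⟨k, by omega, by rw [← hx, hvx]⟩
          · rw [PySem.Dict.get?_insert_of_ne _ _ hvx] at hv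
            obtain ⟨j, hj, hjv⟩ := hseen2 v hv
            exact ⟨j, by omega, hjv⟩
      have hk1 : (k + 1) + fuel = n.toNat := by
        have := hg.2; rw [hlen] at this; omega
      obtain ⟨L, hL1, hL2, hL3, hL4⟩ := ih (k + 1) _ _ _ hInv' hk1
      exact ⟨L, by omega, hL2, hL3, hL4⟩
    · rw [if_neg hg]
      refine ⟨k, le_refl k, by omega, ⟨hstates, hx, hseen1, hseen2⟩, ?_⟩
      intro hk
      have hlen : states.length = k := by rw [hstates]; simp
      have hkn : (states.length : Int) < n := by
        rw [hlen]
        omega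
      rcases Option.eq_none_or_eq_some (seen.get? x) with h | ⟨v, h⟩
      · exact absurd ⟨h, hkn⟩ hg
      · rw [h]; rfl

theorem bbs_st_add (s : Int) (k d : Nat) : bbsSt s (k + d) = bbsG^[d] (bbsSt s k) := by
  simp [bbsSt, ← Function.iterate_add_apply]
  ring_nf

-- periodicity: a repeated state makes the state sequence periodic from mu on
theorem bbs_periodic (seed : Int) (mu lam : Nat) (hlam : 0 < lam)
    (hrep : bbsSt seed (mu + lam) = bbsSt seed mu) (t : Nat) :
    bbsSt seed (mu + t) = bbsSt seed (mu + t % lam) := by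
  induction t using Nat.strong_induction_on with
  | _ t ih =>
    by_cases h : t < lam
    · rw [Nat.mod_eq_of_lt h]
    · rw [Nat.not_lt] at h
      have h1 : mu + t = (mu + lam) + (t - lam) := by omega
      rw [h1, bbs_st_add, hrep, ← bbs_st_add, ih (t - lam) (by omega),
        Nat.mod_eq_sub_mod h]

-- reading one element of the tiled cyclic part
theorem tile_get (l : List Int) (q r o : Nat) (hr : r ≤ l.length)
    (ho : o < q * l.length + r) :
    ((List.replicate q l).flatten ++ l.take r)[o]? = l[o % l.length]? := by
  induction q generalizing o with
  | zero =>
    simp only [List.replicate_zero, List.flatten_nil, List.nil_append]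
    have hlt : o < r := by omega
    rw [List.getElem?_take_of_lt hlt, Nat.mod_eq_of_lt (by omega)]
  | succ q ih =>
    simp only [List.replicate_succ, List.flatten_cons, List.append_assoc]
    by_cases h : o < l.length
    · rw [List.getElem?_append_left h, Nat.mod_eq_of_lt h]
    · rw [Nat.not_lt] at h
      have hm : (q + 1) * l.length = q * l.length + l.length := by ring
      rw [List.getElem?_append_right h, ih (o - l.length) (by omega),
        Nat.mod_eq_sub_mod h]

-- ===== VERDICT (by name: the statement is the Claim_ definition above) =====
theorem blum_blum_shub_spec : Claim_equal_blum_blum_shub := by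
  intro seed n _
  unfold Spec_blum_blum_shub
  have hA : blum_blum_shub seed n
      = (List.range n.toNat).map (fun j => PySem.Int.mod (bbsSt seed j) 2) := by
    unfold blum_blum_shub
    norm_num only
    rw [PySem.List.pyRange_one]
    simp only [Int.sub_zero, List.foldl_map]
    rw [bbs_a_inv]
    simp
  rw [hA]
  unfold blum_blum_shub_alt
  norm_num only
  have hx0 : PySem.Int.mod (seed * seed) 3675787 = bbsSt seed 0 := by
    show bbsG seed = bbsSt seed 0
    simp [bbsSt]
  rw [hx0]
  obtain ⟨L, -, hLn, ⟨hst, hx, h1, h2⟩, hstop⟩ :=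
    bbs_loop_spec seed n n.toNat 0 PySem.Dict.empty [] (bbsSt seed 0)
      ⟨by simp, rfl, by intro j hj; exact absurd hj (Nat.not_lt_zero j),
        by intro v hv; rw [PySem.Dict.get?_empty] at hv; simp at hv⟩
      (by omega)
  set R := bbsAltLoop 3675787 n n.toNat (bbsSt seed 0) PySem.Dict.empty [] with hR
  have hlen : R.2.1.length = L := by rw [hst]; simp
  by_cases hcase : n ≤ (R.2.1.length : Int)
  · rw [if_pos hcase]
    have hLN : L = n.toNat := by rw [hlen] at hcase; omega
    rw [hst, hLN, List.map_map]
    rfl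
  · rw [if_neg hcase]
    have hLn2 : L < n.toNat := by rw [hlen] at hcase; omega
    have hsome := hstop hLn2
    rw [hx] at hsome
    obtain ⟨muN, hmu, hmueq⟩ := h2 _ hsome
    have hget : R.1.get? (bbsSt seed L) = some (muN : Int) := by
      rw [← hmueq]; exact h1 muN hmu
    rw [hx, hget]
    simp only [Option.getD_some, hst, List.length_map, List.length_range]
    have hlam0 : 0 < L - muN := by omega
    have hc1 : (L : Int) - (muN : Int) = ((L - muN : Nat) : Int) := by omega
    have hc2 : n - (L : Int) = ((n.toNat - L : Nat) : Int) := by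
      rw [hlen] at hcase; omega
    rw [hc1, hc2, PySem.Int.floordiv_natCast, PySem.Int.mod_natCast, Int.toNat_natCast,
      PySem.List.slice_from _ (Int.natCast_nonneg muN), Int.toNat_natCast,
      PySem.List.slice_to _ (Int.natCast_nonneg _), Int.toNat_natCast]
    set lamN := L - muN with hlamdef
    set remN := n.toNat - L with hremdef
    set c := ((List.map (bbsSt seed) (List.range L)).drop muN).map
      (fun s => PySem.Int.mod s 2) with hc
    have hclen : c.length = lamN := by simp [hc]; omega
    have hrep : bbsSt seed (muN + lamN) = bbsSt seed muN := by
      have hL : muN + lamN = L := by omega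
      rw [hL]; exact hmueq.symm
    have hcget : ∀ j : Nat, j < lamN →
        getElem? c j = some (PySem.Int.mod (bbsSt seed (muN + j)) 2) := by
      intro j hj
      simp [hc, List.getElem?_drop, (by omega : muN + j < L)]
    have hdm : remN / lamN * lamN + remN % lamN = remN := by
      conv_lhs => rw [Nat.mul_comm]
      exact Nat.div_add_mod remN lamN
    apply List.ext_getElem?
    intro i
    rw [List.append_assoc]
    by_cases hiL : i < L
    · rw [List.getElem?_append_left (by simpa using hiL)]
      simp [hiL, (by omega : i < n.toNat)]
    · rw [List.getElem?_append_right (by simpa using hiL)]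
      simp only [List.length_map, List.length_range]
      by_cases hiN : i < n.toNat
      · have htile := tile_get c (remN / lamN) (remN % lamN) (i - L)
          (by rw [hclen]; exact le_of_lt (Nat.mod_lt _ hlam0))
          (by rw [hclen, hdm]; omega)
        rw [htile, hclen]
        rw [hcget _ (Nat.mod_lt _ hlam0)]
        have hsteq : bbsSt seed i = bbsSt seed (muN + (i - L) % lamN) := by
          have hi1 : i = muN + (i - muN) := by omega
          have hper := bbs_periodic seed muN lamN hlam0 hrep (i - muN)
          have hi2 : (i - muN) % lamN = (i - L) % lamN := by
            have hi3 : i - muN = (i - L) + lamN := by omega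
            rw [hi3, Nat.add_mod_right]
          calc bbsSt seed i = bbsSt seed (muN + (i - muN)) := by rw [← hi1]
            _ = bbsSt seed (muN + (i - muN) % lamN) := hper
            _ = bbsSt seed (muN + (i - L) % lamN) := by rw [hi2]
        simp [hiN, hsteq]
      · rw [List.getElem?_eq_none (by simp; omega),
          List.getElem?_eq_none]
        simp only [List.length_append, List.length_flatten, List.map_replicate,
          List.sum_replicate, smul_eq_mul, List.length_take, hclen]
        omega
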